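-- pv_equiv track=rewrite | github.com/noorulameenkm/DataStructuresAlgorithms | String/flagwords__facebook.py | flag_words
-- ===== SOURCE A (Python) =====
-- def flag_words(S, W):
--
--     def repeated_count(string, index):
--         temp = index
--         while temp < len(string) and string[temp] == string[index]:
--             temp += 1
--
--         return temp - index
--
--
--     if not S and not W:
--         return False
--
--     i, j = 0, 0
--     while i < len(S) and j < len(W):
--         if S[i] == W[j]:
--             len1 = repeated_count(S, i)
--             len2 = repeated_count(W, j)
--             if (len1 < 3 and len1 != len2) or (len1 >= 3 and len1 < len2):
--                 return False
--         else:
--             return False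
--
--         i += len1
--         j += len2
--
--     return i == len(S) and j == len(W)
-- ===== SOURCE B (Python) =====
-- def flag_words(S, W):
--     if not S and not W:
--         return False
--
--     def rle(s):
--         runs = []
--         for ch in s:
--             if runs and runs[-1][0] == ch:
--                 runs[-1] = (ch, runs[-1][1] + 1)
--             else:
--                 runs.append((ch, 1))
--         return runs
--
--     rs, rw = rle(S), rle(W)
--     if len(rs) != len(rw):
--         return False
--     for (c1, n1), (c2, n2) in zip(rs, rw):
--         if c1 != c2 or (n1 < 3 and n1 != n2) or (n1 >= 3 and n1 < n2):
--             return False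
--     return True
-- ===== Notes on version B (the rewrite author's own statement) =====
-- stated objective: alternative
-- what changed: Replaces the interleaved two-pointer scan with inner repeated_count rescans by run-length-encoding each string once into a run table and then comparing the two tables pairwise.
import Mathlib
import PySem

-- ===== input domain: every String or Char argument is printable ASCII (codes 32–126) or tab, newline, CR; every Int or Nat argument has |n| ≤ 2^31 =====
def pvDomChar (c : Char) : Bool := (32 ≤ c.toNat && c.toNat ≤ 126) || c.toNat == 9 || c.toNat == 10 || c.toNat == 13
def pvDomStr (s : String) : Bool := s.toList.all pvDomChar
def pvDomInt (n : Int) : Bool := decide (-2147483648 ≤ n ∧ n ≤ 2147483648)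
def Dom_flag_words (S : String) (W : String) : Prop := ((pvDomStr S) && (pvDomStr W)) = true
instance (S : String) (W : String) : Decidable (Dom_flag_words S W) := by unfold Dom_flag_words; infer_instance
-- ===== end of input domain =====

-- B re-implements A by run-length-encoding each string once, then comparing the two run
-- tables pairwise; same O(n+m) cost, different pass structure (alternative decomposition).

-- ===== PORT A =====
-- repeated_count(string, index): given the character at index and the rest of the
-- suffix after it, count how many further copies of that character follow.
def twlA (c : Char) : List Char → Nat
  | [] => 0
  | x :: xs => if x = c then twlA c xs + 1 else 0

-- the while loop of A, on the suffixes S[i:], W[j:] (i += len1 = dropping len1 chars)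
def flagLoop (s w : List Char) : Bool :=
  match s, w with
  | a :: s', b :: w' =>
    if a = b then
      let len1 := 1 + twlA a s'      -- repeated_count(S, i)
      let len2 := 1 + twlA b w'      -- repeated_count(W, j)
      if (len1 < 3 ∧ len1 ≠ len2) ∨ (3 ≤ len1 ∧ len1 < len2) then false
      else flagLoop (s'.drop (twlA a s')) (w'.drop (twlA b w'))
    else false
  | s, w => s.isEmpty && w.isEmpty    -- final: i == len(S) and j == len(W)
termination_by s.length
decreasing_by simp

def flag_words (S : String) (W : String) : Bool :=
  if S.toList = [] ∧ W.toList = [] then false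
  else flagLoop S.toList W.toList

-- ===== PORT B =====
-- one step of Source B's rle loop; runs are kept in reverse order (runs[-1] = head)
def rleStep (acc : List (Char × Nat)) (ch : Char) : List (Char × Nat) :=
  match acc with
  | (d, n) :: rest => if d = ch then (ch, n + 1) :: rest else (ch, 1) :: (d, n) :: rest
  | [] => [(ch, 1)]

def rle (s : List Char) : List (Char × Nat) := (s.foldl rleStep []).reverse

def pairOk (p : (Char × Nat) × (Char × Nat)) : Bool :=
  if p.1.1 ≠ p.2.1 ∨ (p.1.2 < 3 ∧ p.1.2 ≠ p.2.2) ∨ (3 ≤ p.1.2 ∧ p.1.2 < p.2.2) then false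
  else true

def flag_words_alt (S : String) (W : String) : Bool :=
  if S.toList = [] ∧ W.toList = [] then false
  else
    let rs := rle S.toList
    let rw := rle W.toList
    if rs.length ≠ rw.length then false
    else (rs.zip rw).all pairOk

-- ===== PRECONDITION & SPEC =====
def Spec_flag_words (S : String) (W : String) (out : Bool) : Prop := out = flag_words_alt S W
instance (S : String) (W : String) (out : Bool) : Decidable (Spec_flag_words S W out) := by unfold Spec_flag_words; infer_instance

-- ===== CLAIM (what is proved, stated in full; the proofs are below) =====
def Claim_equal_flag_words : Prop := ∀ (S : String) (W : String), Dom_flag_words S W → Spec_flag_words S W (flag_words S W)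

-- ===== LEMMAS AND PROOFS =====

-- head-run peeling form of rle, used to relate B's fold to A's loop
def rleRec (s : List Char) : List (Char × Nat) :=
  match s with
  | [] => []
  | a :: s' => (a, 1 + twlA a s') :: rleRec (s'.drop (twlA a s'))
termination_by s.length
decreasing_by simp

theorem rleRec_nil : rleRec [] = [] := by rw [rleRec]

theorem rleRec_cons (a : Char) (s' : List Char) :
    rleRec (a :: s') = (a, 1 + twlA a s') :: rleRec (s'.drop (twlA a s')) := by
  rw [rleRec]

theorem flagLoop_nil_nil : flagLoop [] [] = true := by rw [flagLoop.eq_def]; rfl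

theorem flagLoop_nil_cons (b : Char) (w' : List Char) : flagLoop [] (b :: w') = false := by
  rw [flagLoop.eq_def]; rfl

theorem flagLoop_cons_nil (a : Char) (s' : List Char) : flagLoop (a :: s') [] = false := by
  rw [flagLoop.eq_def]; rfl

theorem flagLoop_cons_cons (a b : Char) (s' w' : List Char) :
    flagLoop (a :: s') (b :: w') =
      if a = b then
        (if (1 + twlA a s' < 3 ∧ 1 + twlA a s' ≠ 1 + twlA b w') ∨
            (3 ≤ 1 + twlA a s' ∧ 1 + twlA a s' < 1 + twlA b w') then false
         else flagLoop (s'.drop (twlA a s')) (w'.drop (twlA b w')))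
      else false := by
  rw [flagLoop.eq_def]

theorem head_drop_twlA (c : Char) (s : List Char) :
    ∀ p ∈ (s.drop (twlA c s)).head?, p ≠ c := by
  induction s with
  | nil => simp [twlA]
  | cons x xs ih =>
    by_cases h : x = c
    · simpa [twlA, h] using ih
    · simpa [twlA, h] using h

-- peeling a run inside the fold
theorem foldl_rleStep_run (s : List Char) (c : Char) (n : Nat) (rest : List (Char × Nat)) :
    List.foldl rleStep ((c, n) :: rest) s
      = List.foldl rleStep ((c, n + twlA c s) :: rest) (s.drop (twlA c s)) := by
  induction s generalizing n with
  | nil => simp [twlA]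
  | cons x xs ih =>
    by_cases h : x = c
    · subst h
      rw [List.foldl_cons]
      have h1 : rleStep ((x, n) :: rest) x = (x, n + 1) :: rest := by simp [rleStep]
      rw [h1, ih (n + 1)]
      have h2 : twlA x (x :: xs) = twlA x xs + 1 := by simp [twlA]
      rw [h2]
      have h3 : (x :: xs).drop (twlA x xs + 1) = xs.drop (twlA x xs) := by simp
      rw [h3]
      have h4 : n + 1 + twlA x xs = n + (twlA x xs + 1) := by omega
      rw [h4]
    · simp [twlA, h]

theorem foldl_rleStep_eq_rleRec (s : List Char) (acc : List (Char × Nat))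
    (h : ∀ p ∈ acc.head?, ∀ x ∈ s.head?, p.1 ≠ x) :
    (List.foldl rleStep acc s).reverse = acc.reverse ++ rleRec s := by
  match s with
  | [] => simp [rleRec_nil]
  | a :: s' =>
    have hstep : rleStep acc a = (a, 1) :: acc := by
      match acc with
      | [] => rfl
      | (d, m) :: rest =>
        have hd : d ≠ a := h (d, m) (by simp) a (by simp)
        simp [rleStep, hd]
    rw [List.foldl_cons, hstep, foldl_rleStep_run]
    have hrec := foldl_rleStep_eq_rleRec (s'.drop (twlA a s')) ((a, 1 + twlA a s') :: acc)
      (by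
        intro p hp x hx
        simp at hp; subst hp
        exact (head_drop_twlA a s' x hx).symm)
    rw [hrec]
    simp [rleRec_cons]
termination_by s.length
decreasing_by simp

theorem rle_eq_rleRec (s : List Char) : rle s = rleRec s := by
  have := foldl_rleStep_eq_rleRec s [] (by simp)
  simpa [rle] using this

-- the comparison part of B, on run tables
def runCompare (rs rw : List (Char × Nat)) : Bool :=
  if rs.length ≠ rw.length then false else (rs.zip rw).all pairOk

theorem runCompare_cons (p q : (Char × Nat)) (rs rw : List (Char × Nat)) :
    runCompare (p :: rs) (q :: rw) = (pairOk (p, q) && runCompare rs rw) := by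
  simp only [runCompare, List.zip_cons_cons, List.all_cons, List.length_cons]
  by_cases h : rs.length = rw.length
  · simp [h]
  · have h2 : ¬ (rs.length + 1 = rw.length + 1) := by omega
    simp [h, h2]

theorem flagLoop_eq_runCompare (s w : List Char) :
    flagLoop s w = runCompare (rleRec s) (rleRec w) := by
  match s, w with
  | [], [] => simp [flagLoop_nil_nil, rleRec_nil, runCompare]
  | [], b :: w' => simp [flagLoop_nil_cons, rleRec_nil, rleRec_cons, runCompare]
  | a :: s', [] => simp [flagLoop_cons_nil, rleRec_nil, rleRec_cons, runCompare]
  | a :: s', b :: w' =>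
    rw [flagLoop_cons_cons, rleRec_cons, rleRec_cons, runCompare_cons]
    by_cases hab : a = b
    · subst hab
      by_cases hbad : (1 + twlA a s' < 3 ∧ 1 + twlA a s' ≠ 1 + twlA a w') ∨
          (3 ≤ 1 + twlA a s' ∧ 1 + twlA a s' < 1 + twlA a w')
      · have hok : pairOk ((a, 1 + twlA a s'), (a, 1 + twlA a w')) = false := by
          simp only [pairOk]
          rw [if_pos]
          right
          exact Or.imp (fun h => ⟨h.1, h.2⟩) (fun h => ⟨h.1, h.2⟩) hbad
        rw [if_pos rfl, if_pos hbad, hok]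
        simp
      · have hok : pairOk ((a, 1 + twlA a s'), (a, 1 + twlA a w')) = true := by
          simp only [pairOk]
          rw [if_neg]
          intro hc
          exact hbad (hc.resolve_left (by simp))
        rw [if_pos rfl, if_neg hbad, hok,
          flagLoop_eq_runCompare (s'.drop (twlA a s')) (w'.drop (twlA a w'))]
        simp
    · have hok : pairOk ((a, 1 + twlA a s'), (b, 1 + twlA b w')) = false := by
        simp only [pairOk]
        rw [if_pos (Or.inl hab)]
      rw [if_neg hab, hok]
      simp
termination_by s.length
decreasing_by simp

-- ===== VERDICT (by name: the statement is the Claim_ definition above) =====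
theorem flag_words_spec : Claim_equal_flag_words := by
  intro S W _
  unfold Spec_flag_words flag_words flag_words_alt
  by_cases h : S.toList = [] ∧ W.toList = []
  · simp [h]
  · simp only [if_neg h]
    rw [flagLoop_eq_runCompare, rle_eq_rleRec, rle_eq_rleRec]
    rfl
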